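-- pv_equiv track=rewrite | github.com/kobeomseok95/remind-algorithm | python/programmers/level2/12973.py | solution
-- ===== SOURCE A (Python) =====
-- def solution(s):
--     stack = []
--     for c in s:
--         if not stack or stack[-1] != c:
--             stack.append(c)
--         elif stack[-1] == c:
--             stack.pop()
--
--     return int(not stack)
-- ===== SOURCE B (Python) =====
-- def solution(s):
--     def reduce(chars):
--         if len(chars) <= 1:
--             return chars
--         m = len(chars) // 2
--         a = reduce(chars[:m])
--         b = reduce(chars[m:])
--         while a and b and a[-1] == b[0]:
--             a.pop()
--             del b[0]
--         return a + b
--     return int(not reduce(list(s)))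
-- ===== Notes on version B (the rewrite author's own statement) =====
-- stated objective: alternative
-- what changed: Replaces the single left-to-right stack pass with a divide-and-conquer reduction: recursively collapse each half of the string, cancel equal characters across the boundary of the two reduced halves, and return 1 iff the fully reduced list is empty.
import Mathlib
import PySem

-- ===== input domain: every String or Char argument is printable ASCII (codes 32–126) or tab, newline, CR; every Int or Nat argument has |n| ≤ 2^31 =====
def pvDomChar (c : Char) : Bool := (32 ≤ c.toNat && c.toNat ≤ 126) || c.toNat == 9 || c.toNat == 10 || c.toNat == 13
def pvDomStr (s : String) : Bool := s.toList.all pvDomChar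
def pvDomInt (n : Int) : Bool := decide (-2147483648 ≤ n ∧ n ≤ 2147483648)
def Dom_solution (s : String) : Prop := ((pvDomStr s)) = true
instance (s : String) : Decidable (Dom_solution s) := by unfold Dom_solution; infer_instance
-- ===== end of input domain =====

-- B replaces A's single left-to-right stack pass with a divide-and-conquer reduction
-- (collapse each half, cancel across the boundary); alternative decomposition.

-- ===== PORT A =====
-- one step of A's loop body: push c unless it equals the top of the stack, else pop
def solStep (st : List Char) (c : Char) : List Char :=
  if st = [] ∨ st.getLast? ≠ some c then st ++ [c] else st.dropLast

def solution (s : String) : Int :=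
  if s.toList.foldl solStep [] = [] then 1 else 0

-- ===== PORT B =====
-- B's inner while-loop: cancel equal characters across the boundary of the two halves
def cancel (u v : List Char) : List Char × List Char :=
  if h : u ≠ [] ∧ v ≠ [] ∧ u.getLast? = v.head? then
    cancel u.dropLast v.tail
  else
    (u, v)
termination_by u.length
decreasing_by
  have hu : u ≠ [] := h.1
  cases u with
  | nil => exact absurd rfl hu
  | cons a t => simp

-- B's recursive reduce: collapse each half, then cancel across the boundary
def reduceDC (l : List Char) : List Char :=
  if l.length ≤ 1 then l
  else
    let m := l.length / 2
    let a := reduceDC (l.take m)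
    let b := reduceDC (l.drop m)
    (cancel a b).1 ++ (cancel a b).2
termination_by l.length
decreasing_by
  · simp; omega
  · simp; omega

def solution_alt (s : String) : Int :=
  if reduceDC s.toList = [] then 1 else 0

-- ===== PRECONDITION & SPEC =====
def Spec_solution (s : String) (out : Int) : Prop := out = solution_alt s
instance (s : String) (out : Int) : Decidable (Spec_solution s out) := by unfold Spec_solution; infer_instance

-- ===== CLAIM (what is proved, stated in full; the proofs are below) =====
def Claim_equal_solution : Prop := ∀ (s : String), Dom_solution s → Spec_solution s (solution s)

-- ===== LEMMAS AND PROOFS =====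

-- reachability by deleting adjacent equal pairs (B's reductions, seen abstractly)
inductive Red : List Char → List Char → Prop
  | refl (l : List Char) : Red l l
  | head (u : List Char) (c : Char) (v l' : List Char) :
      Red (u ++ v) l' → Red (u ++ c :: c :: v) l'

theorem red_trans {a b c : List Char} (h1 : Red a b) (h2 : Red b c) : Red a c := by
  induction h1 with
  | refl => exact h2
  | head u x v l' _ ih => exact Red.head u x v c (ih h2)

theorem red_append_right {x y : List Char} (h : Red x y) (z : List Char) :
    Red (x ++ z) (y ++ z) := by
  induction h with
  | refl l => exact Red.refl _
  | head u c v l' _ ih =>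
    have : (u ++ c :: c :: v) ++ z = u ++ c :: c :: (v ++ z) := by simp
    rw [this]
    exact Red.head u c (v ++ z) (l' ++ z) (by simpa using ih)

theorem red_append_left {x y : List Char} (h : Red x y) (z : List Char) :
    Red (z ++ x) (z ++ y) := by
  induction h with
  | refl l => exact Red.refl _
  | head u c v l' _ ih =>
    have : z ++ (u ++ c :: c :: v) = (z ++ u) ++ c :: c :: v := by simp
    rw [this]
    exact Red.head (z ++ u) c v (z ++ l') (by simpa using ih)

-- A's stack run over a list
def runA (st : List Char) (l : List Char) : List Char := l.foldl solStep st

theorem runA_append (st : List Char) (u v : List Char) :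
    runA st (u ++ v) = runA (runA st u) v := by
  simp [runA]

-- the stack never holds two equal adjacent characters
theorem isChain_solStep {st : List Char} (h : List.IsChain (· ≠ ·) st) (c : Char) :
    List.IsChain (· ≠ ·) (solStep st c) := by
  unfold solStep
  split
  · next hc =>
    rcases hc with rfl | hne
    · simp
    · rw [List.isChain_append]
      refine ⟨h, List.isChain_singleton _, ?_⟩
      intro x hx y hy
      simp at hy; subst hy
      intro hxy; subst hxy
      exact hne hx
  · next hc =>
    rcases List.eq_nil_or_concat st with rfl | ⟨u, a, rfl⟩
    · simp
    · rw [List.concat_eq_append] at h ⊢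
      rw [List.isChain_append] at h
      simpa using h.1

theorem isChain_runA {st : List Char} (h : List.IsChain (· ≠ ·) st) (l : List Char) :
    List.IsChain (· ≠ ·) (runA st l) := by
  induction l generalizing st with
  | nil => exact h
  | cons c t ih => exact ih (isChain_solStep h c)

-- processing two equal characters leaves an adjacent-distinct stack unchanged
theorem runA_cc {st : List Char} (h : List.IsChain (· ≠ ·) st) (c : Char) :
    solStep (solStep st c) c = st := by
  rcases List.eq_nil_or_concat st with rfl | ⟨u, a, rfl⟩
  · simp [solStep]
  · rw [List.concat_eq_append]
    by_cases hac : a = c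
    · subst hac
      rw [List.concat_eq_append] at h
      have h1 : solStep (u ++ [a]) a = u := by
        simp [solStep]
      rw [h1]
      rcases List.eq_nil_or_concat u with rfl | ⟨w, b, rfl⟩
      · simp [solStep]
      · rw [List.concat_eq_append] at h
        rw [List.isChain_append] at h
        have hba : b ≠ a := by
          have := h.2.2 b (by simp) a (by simp)
          exact this
        simp [solStep, hba]
    · have h1 : solStep (u ++ [a]) c = (u ++ [a]) ++ [c] := by
        simp [solStep, hac]
      rw [h1]
      simp [solStep]

-- deleting an adjacent equal pair does not change A's stack
theorem runA_remove (u v : List Char) (c : Char) :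
    runA [] (u ++ c :: c :: v) = runA [] (u ++ v) := by
  have hch : List.IsChain (· ≠ ·) (runA ([] : List Char) u) :=
    isChain_runA (by simp) u
  calc runA [] (u ++ c :: c :: v)
      = runA (runA [] u) (c :: c :: v) := runA_append _ _ _
    _ = runA (solStep (solStep (runA [] u) c) c) v := rfl
    _ = runA (runA [] u) v := by rw [runA_cc hch]
    _ = runA [] (u ++ v) := (runA_append _ _ _).symm

theorem red_runA {x y : List Char} (h : Red x y) : runA [] x = runA [] y := by
  induction h with
  | refl l => rfl
  | head u c v l' _ ih => rw [runA_remove]; exact ih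

-- an adjacent-distinct list passes through A's stack untouched
theorem runA_irreducible {t : List Char} (h : List.IsChain (· ≠ ·) t) :
    runA [] t = t := by
  induction t using List.reverseRecOn with
  | nil => rfl
  | append_singleton u c ih =>
    rw [List.isChain_append] at h
    rw [runA_append, ih h.1]
    rcases List.eq_nil_or_concat u with rfl | ⟨w, b, rfl⟩
    · simp [runA, solStep]
    · rw [List.concat_eq_append]
      have hbc : b ≠ c := h.2.2 b (by simp) c (by simp)
      simp [runA, solStep, hbc]

-- cancellation across the boundary only deletes adjacent equal pairs,
-- and two reduced halves with a non-matching boundary are reduced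
theorem cancel_red (u v : List Char) (hu : List.IsChain (· ≠ ·) u)
    (hv : List.IsChain (· ≠ ·) v) :
    Red (u ++ v) ((cancel u v).1 ++ (cancel u v).2) ∧
      List.IsChain (· ≠ ·) ((cancel u v).1 ++ (cancel u v).2) := by
  induction u, v using cancel.induct with
  | case1 u v h ih =>
    obtain ⟨hune, hvne, heq⟩ := h
    rcases List.eq_nil_or_concat u with rfl | ⟨w, a, rfl⟩
    · exact absurd rfl hune
    · cases v with
      | nil => exact absurd rfl hvne
      | cons b t =>
        rw [List.concat_eq_append] at heq hu ⊢
        simp at heq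
        subst heq
        have hw : List.IsChain (· ≠ ·) w := (List.isChain_append.mp hu).1
        have ht : List.IsChain (· ≠ ·) t := by
          have : List.IsChain (· ≠ ·) ([a] ++ t) := hv
          exact (List.isChain_append.mp this).2.1
        have hcan : cancel (w ++ [a]) (a :: t) = cancel w t := by
          rw [cancel]
          rw [dif_pos ⟨by simp, by simp, by simp⟩]
          simp
        rw [hcan]
        have hIH := ih (by rw [List.concat_eq_append]; simpa using hw)
          (by simpa using ht)
        simp at hIH
        refine ⟨?_, hIH.2⟩
        have hstep : Red (w ++ a :: a :: t) ((cancel w t).1 ++ (cancel w t).2) :=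
      Red.head w a t _ hIH.1
        simpa using hstep
  | case2 u v h =>
    rw [cancel, dif_neg h]
    refine ⟨Red.refl _, List.isChain_append.mpr ⟨hu, hv, ?_⟩⟩
    intro x hx y hy
    push Not at h
    rcases List.eq_nil_or_concat u with rfl | ⟨w, a, rfl⟩
    · simp at hx
    · cases v with
      | nil => simp at hy
      | cons b t =>
        have hne := h (by simp) (by simp)
        rw [List.concat_eq_append] at hx hne
        simp at hx hy hne
        subst hx; subst hy
        exact hne

-- B's divide-and-conquer result: reachable from l by pair deletions, and reduced
theorem reduceDC_spec (l : List Char) :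
    Red l (reduceDC l) ∧ List.IsChain (· ≠ ·) (reduceDC l) := by
  induction l using reduceDC.induct with
  | case1 l hlen =>
    rw [reduceDC, if_pos hlen]
    refine ⟨Red.refl _, ?_⟩
    match l with
    | [] => simp
    | [a] => simp
    | a :: b :: t => simp at hlen
  | case2 l hlen m iha ihb =>
    rw [reduceDC, if_neg hlen]
    have hsplit : l = l.take m ++ l.drop m := (List.take_append_drop m l).symm
    have r1 : Red l (reduceDC (l.take m) ++ l.drop m) := by
      nth_rewrite 1 [hsplit]
      exact red_append_right iha.1 _
    have r2 : Red (reduceDC (l.take m) ++ l.drop m)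
        (reduceDC (l.take m) ++ reduceDC (l.drop m)) :=
      red_append_left ihb.1 _
    have hc := cancel_red (reduceDC (l.take m)) (reduceDC (l.drop m)) iha.2 ihb.2
    exact ⟨red_trans (red_trans r1 r2) hc.1, hc.2⟩

-- B's fixpoint list equals A's final stack
theorem reduceDC_eq_runA (l : List Char) : reduceDC l = runA [] l := by
  obtain ⟨hr, hch⟩ := reduceDC_spec l
  rw [red_runA hr, runA_irreducible hch]

-- ===== VERDICT (by name: the statement is the Claim_ definition above) =====
theorem solution_spec : Claim_equal_solution := by
  intro s _
  unfold Spec_solution solution solution_alt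
  rw [reduceDC_eq_runA]
  rfl
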